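-- pv_equiv track=rewrite | github.com/tonyshovel/ReverseString | reverse_messages.py | reverse_whole
-- ===== SOURCE A (Python) =====
-- def reverse_whole(messages):
-- 	def reverse_sing(single_word):
-- 		sing_w = list(single_word)
-- 		sing_w.reverse()
-- 		sing_w = ''.join(sing_w)
-- 		return sing_w
-- 	messages = messages.split(" ")
-- 	for i in range(len(messages)):
-- 		messages[i] = reverse_sing(messages[i])
-- 	return (" ".join(messages)).lower()
-- ===== SOURCE B (Python) =====
-- def reverse_whole(messages):
--     rev = messages[::-1]
--     tokens = rev.split(" ")
--     tokens.reverse()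
--     return " ".join(tokens).lower()
-- ===== Notes on version B (the rewrite author's own statement) =====
-- stated objective: alternative
-- what changed: B reverses the entire string once and then reverses the order of the space-split tokens, instead of splitting first and reversing each word individually in a loop.
import Mathlib
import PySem

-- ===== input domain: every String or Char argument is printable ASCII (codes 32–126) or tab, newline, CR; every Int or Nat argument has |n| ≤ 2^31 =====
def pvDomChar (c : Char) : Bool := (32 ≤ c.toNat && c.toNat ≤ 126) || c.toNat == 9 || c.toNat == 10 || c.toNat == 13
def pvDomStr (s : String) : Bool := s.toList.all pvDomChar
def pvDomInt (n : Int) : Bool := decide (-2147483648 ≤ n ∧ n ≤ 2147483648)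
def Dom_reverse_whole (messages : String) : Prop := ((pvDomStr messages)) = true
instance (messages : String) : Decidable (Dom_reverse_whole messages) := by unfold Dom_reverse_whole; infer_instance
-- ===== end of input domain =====

-- B reverses the whole string once and flips the token order instead of reversing each word in a loop; a different decomposition of the same O(n) task.

-- ===== PORT A =====
-- reverse_sing: list(word), .reverse(), ''.join  =  reverse of the char list
def reverse_sing (single_word : String) : String :=
  String.ofList single_word.toList.reverse

def reverse_whole (messages : String) : String :=
  -- messages = messages.split(" ")  (sep ≠ "", so split? is some)
  let parts := (PySem.Str.split? messages " ").getD []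
  -- for i in range(len(messages)): messages[i] = reverse_sing(messages[i])
  let parts := parts.map reverse_sing
  -- return (" ".join(messages)).lower()
  PySem.Str.lower (PySem.Str.join " " parts)

-- ===== PORT B =====
def reverse_whole_alt (messages : String) : String :=
  -- rev = messages[::-1]
  let rev := (PySem.Str.slice? messages none none (-1)).getD ""
  -- tokens = rev.split(" ")
  let tokens := (PySem.Str.split? rev " ").getD []
  -- tokens.reverse()
  let tokens := tokens.reverse
  -- return " ".join(tokens).lower()
  PySem.Str.lower (PySem.Str.join " " tokens)

-- ===== PRECONDITION & SPEC =====
def Spec_reverse_whole (messages : String) (out : String) : Prop := out = reverse_whole_alt messages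
instance (messages : String) (out : String) : Decidable (Spec_reverse_whole messages out) := by unfold Spec_reverse_whole; infer_instance

-- ===== CLAIM (what is proved, stated in full; the proofs are below) =====
def Claim_equal_reverse_whole : Prop := ∀ (messages : String), Dom_reverse_whole messages → Spec_reverse_whole messages (reverse_whole messages)

-- ===== LEMMAS AND PROOFS =====

-- Simple structural recursion characterizing split on a single space.
def splitSp : List Char → List (List Char)
  | [] => [[]]
  | c :: rest =>
    if c = ' ' then [] :: splitSp rest
    else (splitSp rest).modifyHead (fun w => c :: w)

theorem splitSp_ne_nil (l : List Char) : splitSp l ≠ [] := by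
  cases l with
  | nil => simp [splitSp]
  | cons c rest =>
    simp only [splitSp]
    split_ifs
    · simp
    · cases h : splitSp rest with
      | nil => exact absurd h (splitSp_ne_nil rest)
      | cons a t => simp [List.modifyHead]

theorem modifyHead_append_left {α : Type} (f : α → α) (l m : List α) (h : l ≠ []) :
    (l ++ m).modifyHead f = l.modifyHead f ++ m := by
  cases l with
  | nil => exact absurd rfl h
  | cons a t => simp [List.modifyHead]

theorem splitSp_cons_space (rest : List Char) :
    splitSp (' ' :: rest) = [] :: splitSp rest := by
  simp [splitSp]

theorem splitSp_cons_char (c : Char) (rest : List Char) (hc : c ≠ ' ') :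
    splitSp (c :: rest) = (splitSp rest).modifyHead (fun w => c :: w) := by
  simp [splitSp, hc]

theorem splitOn_go_space (fuel : Nat) :
    ∀ (l cur : List Char) (accs : List (List Char)), l.length ≤ fuel →
    PySem.Chars.splitOn.go [' '] fuel l cur accs =
      accs.reverse ++ (splitSp l).modifyHead (fun w => cur.reverse ++ w) := by
  induction fuel with
  | zero =>
    intro l cur accs h
    have hl : l = [] := List.eq_nil_of_length_eq_zero (Nat.le_zero.mp h)
    subst hl
    simp [PySem.Chars.splitOn.go, splitSp, List.modifyHead]
  | succ f ih =>
    intro l cur accs h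
    cases l with
    | nil => simp [PySem.Chars.splitOn.go, splitSp, List.modifyHead]
    | cons c rest =>
      simp only [List.length_cons, Nat.succ_le_succ_iff] at h
      by_cases hc : c = ' '
      · subst hc
        rw [show PySem.Chars.splitOn.go [' '] (f+1) (' ' :: rest) cur accs =
              PySem.Chars.splitOn.go [' '] f rest [] (cur.reverse :: accs) by
            simp [PySem.Chars.splitOn.go, List.isPrefixOf]]
        rw [ih rest [] (cur.reverse :: accs) h]
        simp only [splitSp_cons_space, List.reverse_cons, List.reverse_nil]
        cases hsp : splitSp rest with
        | nil => exact absurd hsp (splitSp_ne_nil rest)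
        | cons a t => simp [List.modifyHead]
      · rw [show PySem.Chars.splitOn.go [' '] (f+1) (c :: rest) cur accs =
              PySem.Chars.splitOn.go [' '] f rest (c :: cur) accs by
            simp only [PySem.Chars.splitOn.go, List.isPrefixOf]
            rw [if_neg]
            simp only [Bool.and_eq_true, beq_iff_eq]
            intro ⟨h1, _⟩
            exact hc h1.symm]
        rw [ih rest (c :: cur) accs h]
        simp only [splitSp_cons_char _ _ hc, List.reverse_cons]
        congr 1
        cases hsp : splitSp rest with
        | nil => exact absurd hsp (splitSp_ne_nil rest)
        | cons a t => simp [List.modifyHead]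

theorem splitOn_space (cs : List Char) :
    PySem.Chars.splitOn cs [' '] = splitSp cs := by
  have h := splitOn_go_space (cs.length + 1) cs [] [] (Nat.le_succ _)
  rw [PySem.Chars.splitOn, h]
  cases hsp : splitSp cs with
  | nil => exact absurd hsp (splitSp_ne_nil cs)
  | cons a t => simp [List.modifyHead]

theorem splitSp_append_space (ys : List Char) :
    splitSp (ys ++ [' ']) = splitSp ys ++ [[]] := by
  induction ys with
  | nil => simp [splitSp]
  | cons c rest ih =>
    by_cases hc : c = ' '
    · subst hc
      rw [List.cons_append, splitSp_cons_space, splitSp_cons_space, ih, List.cons_append]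
    · rw [List.cons_append, splitSp_cons_char _ _ hc, splitSp_cons_char _ _ hc, ih,
        modifyHead_append_left _ _ _ (splitSp_ne_nil rest)]

theorem modifyHead_reverse_comm {α : Type} (f g : α → α) (a : α) (l : List α) (hl : l ≠ []) :
    List.modifyHead g ((List.modifyHead f (a :: l).reverse).reverse) =
      (List.modifyHead f ((List.modifyHead g (a :: l)).reverse)).reverse := by
  obtain ⟨p, q, hpq⟩ := List.exists_cons_of_ne_nil (show l.reverse ≠ [] by simpa using hl)
  simp [List.reverse_cons, hpq, List.modifyHead]

theorem splitSp_append_char (ys : List Char) (x : Char) (hx : x ≠ ' ') :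
    splitSp (ys ++ [x]) = ((splitSp ys).reverse.modifyHead (fun w => w ++ [x])).reverse := by
  induction ys with
  | nil => simp [splitSp, hx, List.modifyHead]
  | cons c rest ih =>
    have hrev : (splitSp rest).reverse ≠ [] := by
      simpa using splitSp_ne_nil rest
    by_cases hc : c = ' '
    · subst hc
      rw [List.cons_append, splitSp_cons_space, splitSp_cons_space, ih, List.reverse_cons,
        modifyHead_append_left _ _ _ hrev]
      simp
    · rw [List.cons_append, splitSp_cons_char _ _ hc, splitSp_cons_char _ _ hc, ih]
      cases h : splitSp rest with
      | nil => exact absurd h (splitSp_ne_nil rest)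
      | cons a t =>
        cases t with
        | nil => simp [List.modifyHead]
        | cons b u =>
          exact modifyHead_reverse_comm _ _ a (b :: u) (by simp)

theorem map_reverse_modifyHead (c : Char) (l : List (List Char)) :
    (l.modifyHead (fun w => c :: w)).map List.reverse =
      (l.map List.reverse).modifyHead (fun w => w ++ [c]) := by
  cases l with
  | nil => rfl
  | cons a t => simp [List.modifyHead]

theorem splitSp_reverse (cs : List Char) :
    splitSp cs.reverse = ((splitSp cs).map List.reverse).reverse := by
  induction cs with
  | nil => simp [splitSp]
  | cons c rest ih =>
    rw [List.reverse_cons]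
    by_cases hc : c = ' '
    · subst hc
      rw [splitSp_append_space, ih, splitSp_cons_space]
      simp
    · rw [splitSp_append_char _ _ hc, ih, List.reverse_reverse,
        splitSp_cons_char _ _ hc, map_reverse_modifyHead]

-- ===== VERDICT (by name: the statement is the Claim_ definition above) =====
theorem reverse_whole_spec : Claim_equal_reverse_whole := by
  intro messages _
  unfold Spec_reverse_whole reverse_whole reverse_whole_alt reverse_sing
  have hsplit : ∀ s : String, PySem.Str.split? s " " =
      some ((splitSp s.toList).map String.ofList) := by
    intro s
    unfold PySem.Str.split?
    rw [show (" " : String).toList = [' '] from rfl]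
    simp only [PySem.Chars.split?, List.isEmpty_cons, Bool.false_eq_true, if_false,
      Option.map_some, splitOn_space]
  rw [PySem.Str.slice?_none_none_neg_one]
  simp only [Option.getD_some, hsplit, String.toList_ofList]
  congr 1
  congr 1
  rw [splitSp_reverse]
  simp [List.map_map, Function.comp, String.toList_ofList]
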